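-- pv_equiv track=rewrite | github.com/jiobu1/CodeSignal_Arcade | Intro/Level 3/allLongestStrings.py | allLongestStrings
-- ===== SOURCE A (Python) =====
-- def allLongestStrings(inputArray):
--     inputArray.sort(key = len, reverse = True)
--
--     longest = len(inputArray[0])
--     arr = []
--
--     for i in inputArray:
--         if len(i) == longest:
--             arr.append(i)
--     return arr
-- ===== SOURCE B (Python) =====
-- def allLongestStrings(inputArray):
--     longest = max(map(len, inputArray))
--     return [s for s in inputArray if len(s) == longest]
-- ===== Notes on version B (the rewrite author's own statement) =====
-- stated objective: simpler
-- what changed: Replaces the in-place sort-by-length-descending followed by a filter of the sorted array with a max-length pass and a comprehension over the original list (no sort, no mutation); A's stable sort makes the two outputs identical on nonempty input.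
import Mathlib
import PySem

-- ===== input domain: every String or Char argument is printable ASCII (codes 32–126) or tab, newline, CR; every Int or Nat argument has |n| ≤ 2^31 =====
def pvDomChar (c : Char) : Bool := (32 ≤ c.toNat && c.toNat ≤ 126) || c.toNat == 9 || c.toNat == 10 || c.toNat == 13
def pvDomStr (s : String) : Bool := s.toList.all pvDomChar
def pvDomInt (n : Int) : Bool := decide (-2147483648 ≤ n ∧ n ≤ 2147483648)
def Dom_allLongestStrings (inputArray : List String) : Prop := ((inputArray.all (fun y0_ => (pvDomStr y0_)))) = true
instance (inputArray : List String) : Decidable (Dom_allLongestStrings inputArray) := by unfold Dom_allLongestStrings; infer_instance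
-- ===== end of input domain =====

-- ===== PORT A =====
-- B changes only the algorithm for the return value; A additionally sorts its argument
-- in place (a side effect B does not perform) — the equivalence proved here is about
-- the return value only.
def allLongestStrings (inputArray : List String) : List String :=
  -- inputArray.sort(key=len, reverse=True)  (stable)
  let sortedArr := PySem.List.sorted inputArray (fun s => PySem.Str.len s) true
  -- longest = len(inputArray[0])  — IndexError on the empty list (excluded by Pre_)
  match PySem.List.pyGet? sortedArr 0 with
  | none => []
  | some h =>
    let longest := PySem.Str.len h
    sortedArr.foldl (fun arr i => if PySem.Str.len i = longest then arr ++ [i] else arr) []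

-- ===== PORT B =====
def allLongestStrings_alt (inputArray : List String) : List String :=
  -- longest = max(len(s) for s in inputArray)  — ValueError on the empty list (excluded by Pre_)
  match PySem.List.max? (inputArray.map (fun s => PySem.Str.len s)) (fun x => x) with
  | none => []
  | some longest => inputArray.filter (fun s => PySem.Str.len s = longest)

-- ===== PRECONDITION & SPEC =====
-- Pre_ excludes only the empty list, on which A raises IndexError (and B raises ValueError).
def Pre_allLongestStrings (inputArray : List String) : Prop := inputArray ≠ []
instance (inputArray : List String) : Decidable (Pre_allLongestStrings inputArray) := by unfold Pre_allLongestStrings; infer_instance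
def pvWitness_allLongestStrings : List String := ["ab", "c", "de"]
def Spec_allLongestStrings (inputArray : List String) (out : List String) : Prop := out = allLongestStrings_alt inputArray
instance (inputArray : List String) (out : List String) : Decidable (Spec_allLongestStrings inputArray out) := by unfold Spec_allLongestStrings; infer_instance

-- ===== CLAIM (what is proved, stated in full; the proofs are below) =====
def Claim_equal_allLongestStrings : Prop := ∀ (inputArray : List String), Dom_allLongestStrings inputArray → Pre_allLongestStrings inputArray → Spec_allLongestStrings inputArray (allLongestStrings inputArray)

-- ===== LEMMAS AND PROOFS =====

-- Stability of A's insertion step at the maximum key: inserting an element of maximal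
-- key M into a descending list appends it after all existing key-M elements.
theorem filt_insert_eq {α : Type} (key : α → Int) (M : Int) (x : α) (ys : List α)
    (hx : key x = M) (hys : ys.Pairwise (fun a b => key b ≤ key a)) :
    (PySem.List.insertBy (fun a b => decide (key b < key a)) x ys).filter (fun y => key y = M)
      = ys.filter (fun y => key y = M) ++ [x] := by
  induction ys with
  | nil => simp [PySem.List.insertBy, hx]
  | cons y ys ih =>
    rw [List.pairwise_cons] at hys
    by_cases h : key y < key x
    · have hfe : ys.filter (fun y => key y = M) = [] := by
        apply List.filter_eq_nil_iff.mpr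
        intro z hz
        have := hys.1 z hz
        simp only [decide_eq_true_eq]
        omega
      have hyM : key y ≠ M := by omega
      simp only [PySem.List.insertBy, h, decide_true]
      simp [List.filter, hx, hfe, hyM]
    · have hne : ¬ (key y = M) ∨ (key y = M) := by tauto
      simp only [PySem.List.insertBy, decide_eq_true_eq, if_neg h]
      by_cases hy : key y = M
      · simp [List.filter, hy, ih hys.2]
      · simp [List.filter, hy, ih hys.2]

-- Inserting an element whose key is not M leaves the key-M filter unchanged.
theorem filt_insert_ne {α : Type} (key : α → Int) (M : Int) (x : α) (ys : List α)
    (hx : key x ≠ M) :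
    (PySem.List.insertBy (fun a b => decide (key b < key a)) x ys).filter (fun y => key y = M)
      = ys.filter (fun y => key y = M) := by
  induction ys with
  | nil => simp [PySem.List.insertBy, hx]
  | cons y ys ih =>
    by_cases h : key y < key x
    · simp only [PySem.List.insertBy, h, decide_true]
      simp [List.filter, hx]
    · simp only [PySem.List.insertBy, decide_eq_true_eq, if_neg h]
      by_cases hy : key y = M
      · simp [List.filter, hy, ih]
      · simp [List.filter, hy, ih]

-- A's stable descending sort preserves the key-M filter of the original list.
theorem filter_sorted_rev {α : Type} (key : α → Int) (M : Int) (xs : List α) :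
    (PySem.List.sorted xs key true).filter (fun y => key y = M)
      = xs.filter (fun y => key y = M) := by
  induction xs using List.reverseRecOn with
  | nil => simp [PySem.List.sorted]
  | append_singleton ys x ih =>
    have hs : PySem.List.sorted (ys ++ [x]) key true
        = PySem.List.insertBy (fun a b => decide (key b < key a)) x (PySem.List.sorted ys key true) := by
      rw [PySem.List.sorted_rev_eq_foldl_insertBy, PySem.List.sorted_rev_eq_foldl_insertBy,
        List.foldl_append]
      simp
    rw [hs]
    by_cases hx : key x = M
    · rw [filt_insert_eq key M x _ hx (PySem.List.sorted_pairwise_rev ys key), ih,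
        List.filter_append]
      simp [List.filter, hx]
    · rw [filt_insert_ne key M x _ hx, ih, List.filter_append]
      simp [List.filter, hx]

-- ===== VERDICT (by name: the statement is the Claim_ definition above) =====
theorem allLongestStrings_spec : Claim_equal_allLongestStrings := by
  intro xs _hdom hne
  unfold Spec_allLongestStrings allLongestStrings allLongestStrings_alt
  -- the sorted list is nonempty
  have hsne : PySem.List.sorted xs (fun s => PySem.Str.len s) true ≠ [] := by
    rw [Ne, PySem.List.sorted_eq_nil_iff]; exact hne
  obtain ⟨m, t, hmt⟩ := List.exists_cons_of_ne_nil hsne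
  -- B's max over the mapped lengths exists
  have hmapne : xs.map (fun s => PySem.Str.len s) ≠ [] := by
    simpa using hne
  obtain ⟨v, hv⟩ : ∃ v, PySem.List.max? (xs.map (fun s => PySem.Str.len s)) (fun x => x) = some v := by
    cases hmax : PySem.List.max? (xs.map (fun s => PySem.Str.len s)) (fun x => x) with
    | none => exact absurd ((PySem.List.max?_eq_none_iff _ _).mp hmax) hmapne
    | some v => exact ⟨v, rfl⟩
  -- the two "longest" values agree
  have hmmax : ∀ y ∈ xs, PySem.Str.len y ≤ PySem.Str.len m :=
    PySem.List.key_head_sorted_rev_ge xs (fun s => PySem.Str.len s) hmt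
  have hm_mem : m ∈ xs := by
    rw [← PySem.List.mem_sorted xs (fun s => PySem.Str.len s) true, hmt]; exact List.mem_cons_self
  have hv_mem : v ∈ xs.map (fun s => PySem.Str.len s) := PySem.List.max?_mem hv
  have hvM : v = PySem.Str.len m := by
    obtain ⟨s, hs, hvs⟩ := List.mem_map.mp hv_mem
    have h1 : v ≤ PySem.Str.len m := hvs ▸ hmmax s hs
    have h2 : PySem.Str.len m ≤ v :=
      PySem.List.max?_isMax hv _ (List.mem_map.mpr ⟨m, hm_mem, rfl⟩)
    omega
  -- evaluate both ports
  rw [hv]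
  simp only [hmt]
  rw [show PySem.List.pyGet? (m :: t) 0 = some m by simp [PySem.List.pyGet?, PySem.List.pyIdx?]]
  have hfilt := filter_sorted_rev (fun s => PySem.Str.len s) (PySem.Str.len m) xs
  rw [hmt] at hfilt
  have hfun : (fun (arr : List String) i => if PySem.Str.len i = PySem.Str.len m then arr ++ [i] else arr)
      = (fun (arr : List String) i => if (decide (PySem.Str.len i = PySem.Str.len m)) = true then arr ++ [id i] else arr) := by
    funext arr i; simp
  show List.foldl (fun arr i => if PySem.Str.len i = PySem.Str.len m then arr ++ [i] else arr) [] (m :: t) = _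
  rw [hvM, hfun, PySem.List.foldl_append_if, List.map_id, List.nil_append, hfilt]
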